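-- pv_equiv track=rewrite | github.com/gobokuku82/holmesnyangz | backend/agents/supervisor_agent.py | _determine_workflow_status
-- ===== SOURCE A (Python) =====
-- from typing import Dict, Any, List, Optional
--
-- def _determine_workflow_status(results: Dict[str, Any]) -> str:
--     """
--     전체 워크플로우 상태 결정
--
--     Returns:
--         Workflow status
--     """
--     statuses = [r.get("status", "unknown") for r in results.values()]
--
--     if all(s == "success" for s in statuses):
--         return "completed"
--     elif any(s == "failed" for s in statuses):
--         failed_count = statuses.count("failed")
--         if failed_count == len(statuses):
--             return "failed"
--         else:
--             return "partially_completed"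
--     elif all(s == "skipped" for s in statuses):
--         return "skipped"
--     else:
--         return "completed_with_warnings"
-- ===== SOURCE B (Python) =====
-- def _determine_workflow_status(results):
--     # Single pass: record WHICH status categories occur (no list, no counts).
--     seen_success = seen_failed = seen_skipped = seen_other = False
--     for r in results.values():
--         s = r.get("status", "unknown")
--         if s == "success":
--             seen_success = True
--         elif s == "failed":
--             seen_failed = True
--         elif s == "skipped":
--             seen_skipped = True
--         else:
--             seen_other = True
--     if not (seen_failed or seen_skipped or seen_other):
--         return "completed"
--     if seen_failed:
--         return "partially_completed" if (seen_success or seen_skipped or seen_other) else "failed"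
--     if seen_skipped and not (seen_success or seen_other):
--         return "skipped"
--     return "completed_with_warnings"
-- ===== Notes on version B (the rewrite author's own statement) =====
-- stated objective: simpler
-- what changed: Replaces A's materialised status list and its four separate scans (all/any/count/all) by a single-pass state machine that only records which of the four status categories was seen, deciding the verdict from those boolean flags.
import Mathlib
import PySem

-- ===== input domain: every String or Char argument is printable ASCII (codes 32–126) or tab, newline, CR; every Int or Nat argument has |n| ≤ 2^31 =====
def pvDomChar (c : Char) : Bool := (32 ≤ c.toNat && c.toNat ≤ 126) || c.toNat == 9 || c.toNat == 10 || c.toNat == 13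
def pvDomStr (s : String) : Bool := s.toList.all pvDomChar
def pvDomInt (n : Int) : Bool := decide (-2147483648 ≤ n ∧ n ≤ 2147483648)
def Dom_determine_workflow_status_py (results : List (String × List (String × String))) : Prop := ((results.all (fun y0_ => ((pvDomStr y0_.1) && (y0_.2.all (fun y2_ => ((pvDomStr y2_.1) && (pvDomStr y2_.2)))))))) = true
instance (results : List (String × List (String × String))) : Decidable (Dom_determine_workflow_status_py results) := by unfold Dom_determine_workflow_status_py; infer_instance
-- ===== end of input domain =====

-- B replaces A's materialised status list and its four scans (all/any/count/all) by a
-- single-pass state machine recording which status categories were seen; objective: simpler.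


-- ===== PORT A =====
def determine_workflow_status_py (results : List (String × List (String × String))) : String :=
  let statuses := results.map (fun r => (PySem.Dict.mk r.2).getD "status" "unknown")
  if statuses.all (fun s => s == "success") then "completed"
  else if statuses.any (fun s => s == "failed") then
    let failed_count := PySem.List.count statuses "failed"
    if failed_count == (statuses.length : Int) then "failed"
    else "partially_completed"
  else if statuses.all (fun s => s == "skipped") then "skipped"
  else "completed_with_warnings"

-- ===== PORT B =====
-- flag accumulator: (seen_success, seen_failed, seen_skipped, seen_other)
def pvFlagStep (f : Bool × Bool × Bool × Bool) (s : String) : Bool × Bool × Bool × Bool :=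
  if s == "success" then (true, f.2.1, f.2.2.1, f.2.2.2)
  else if s == "failed" then (f.1, true, f.2.2.1, f.2.2.2)
  else if s == "skipped" then (f.1, f.2.1, true, f.2.2.2)
  else (f.1, f.2.1, f.2.2.1, true)

def determine_workflow_status_py_alt (results : List (String × List (String × String))) : String :=
  let f := results.foldl
    (fun f r => pvFlagStep f ((PySem.Dict.mk r.2).getD "status" "unknown"))
    (false, false, false, false)
  if !(f.2.1 || f.2.2.1 || f.2.2.2) then "completed"
  else if f.2.1 then
    (if f.1 || f.2.2.1 || f.2.2.2 then "partially_completed" else "failed")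
  else if f.2.2.1 && !(f.1 || f.2.2.2) then "skipped"
  else "completed_with_warnings"

-- ===== PRECONDITION & SPEC =====
def Spec_determine_workflow_status_py (results : List (String × List (String × String))) (out : String) : Prop := out = determine_workflow_status_py_alt results
instance (results : List (String × List (String × String))) (out : String) : Decidable (Spec_determine_workflow_status_py results out) := by unfold Spec_determine_workflow_status_py; infer_instance

-- ===== CLAIM =====
def Claim_equal_determine_workflow_status_py : Prop := ∀ (results : List (String × List (String × String))), Dom_determine_workflow_status_py results → Spec_determine_workflow_status_py results (determine_workflow_status_py results)

-- ===== LEMMAS AND PROOFS =====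

-- the "none of the three named statuses" category of B's state machine
def pvIsOther (s : String) : Bool := !(s == "success") && !(s == "failed") && !(s == "skipped")

-- B's per-pair fold is the same fold over the status list
theorem pv_foldl_map (results : List (String × List (String × String))) :
    results.foldl (fun f r => pvFlagStep f ((PySem.Dict.mk r.2).getD "status" "unknown"))
      (false, false, false, false)
    = (results.map (fun r => (PySem.Dict.mk r.2).getD "status" "unknown")).foldl
        pvFlagStep (false, false, false, false) := by
  rw [List.foldl_map]

-- each flag of the fold is "init-flag OR some element has that category"
theorem pv_flags_spec (xs : List String) (f0 : Bool × Bool × Bool × Bool) :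
    xs.foldl pvFlagStep f0 =
      (f0.1 || xs.any (fun s => s == "success"),
       f0.2.1 || xs.any (fun s => s == "failed"),
       f0.2.2.1 || xs.any (fun s => s == "skipped"),
       f0.2.2.2 || xs.any pvIsOther) := by
  induction xs generalizing f0 with
  | nil => simp
  | cons x xs ih =>
    simp only [List.foldl_cons, List.any_cons, ih, pvFlagStep, pvIsOther]
    by_cases h1 : x = "success"
    · subst h1; simp
    · by_cases h2 : x = "failed"
      · subst h2; simp
      · by_cases h3 : x = "skipped"
        · subst h3; simp
        · have e1 : (x == "success") = false := beq_eq_false_iff_ne.mpr h1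
          have e2 : (x == "failed") = false := beq_eq_false_iff_ne.mpr h2
          have e3 : (x == "skipped") = false := beq_eq_false_iff_ne.mpr h3
          simp [e1, e2, e3]

-- distributing any over a pointwise disjunction
theorem pv_any_or (l : List String) (p q : String → Bool) :
    l.any (fun s => p s || q s) = (l.any p || l.any q) := by
  induction l with
  | nil => rfl
  | cons x xs ih => simp [ih, Bool.or_assoc, Bool.or_left_comm]

-- "all of one status" restated through the anys of the other three categories
theorem pv_all_succ (xs : List String) :
    xs.all (fun s => s == "success") =
      !(xs.any (fun s => s == "failed") || xs.any (fun s => s == "skipped") || xs.any pvIsOther) := by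
  rw [List.all_eq_not_any_not]
  have hpt : ∀ s : String, (!(s == "success")) = ((s == "failed") || ((s == "skipped") || pvIsOther s)) := by
    intro s
    by_cases h1 : s = "success"
    · subst h1; simp [pvIsOther]
    · by_cases h2 : s = "failed"
      · subst h2; simp [pvIsOther]
      · by_cases h3 : s = "skipped"
        · subst h3; simp [pvIsOther]
        · have e1 : (s == "success") = false := beq_eq_false_iff_ne.mpr h1
          have e2 : (s == "failed") = false := beq_eq_false_iff_ne.mpr h2
          have e3 : (s == "skipped") = false := beq_eq_false_iff_ne.mpr h3
          simp [pvIsOther, e1, e2, e3]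
  rw [List.any_congr rfl hpt, pv_any_or, pv_any_or, ← Bool.or_assoc]

theorem pv_all_failed (xs : List String) :
    xs.all (fun s => s == "failed") =
      !(xs.any (fun s => s == "success") || xs.any (fun s => s == "skipped") || xs.any pvIsOther) := by
  rw [List.all_eq_not_any_not]
  have hpt : ∀ s : String, (!(s == "failed")) = ((s == "success") || ((s == "skipped") || pvIsOther s)) := by
    intro s
    by_cases h1 : s = "success"
    · subst h1; simp [pvIsOther]
    · by_cases h2 : s = "failed"
      · subst h2; simp [pvIsOther]
      · by_cases h3 : s = "skipped"
        · subst h3; simp [pvIsOther]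
        · have e1 : (s == "success") = false := beq_eq_false_iff_ne.mpr h1
          have e2 : (s == "failed") = false := beq_eq_false_iff_ne.mpr h2
          have e3 : (s == "skipped") = false := beq_eq_false_iff_ne.mpr h3
          simp [pvIsOther, e1, e2, e3]
  rw [List.any_congr rfl hpt, pv_any_or, pv_any_or, ← Bool.or_assoc]

theorem pv_all_skipped (xs : List String) :
    xs.all (fun s => s == "skipped") =
      !(xs.any (fun s => s == "success") || xs.any (fun s => s == "failed") || xs.any pvIsOther) := by
  rw [List.all_eq_not_any_not]
  have hpt : ∀ s : String, (!(s == "skipped")) = ((s == "success") || ((s == "failed") || pvIsOther s)) := by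
    intro s
    by_cases h1 : s = "success"
    · subst h1; simp [pvIsOther]
    · by_cases h2 : s = "failed"
      · subst h2; simp [pvIsOther]
      · by_cases h3 : s = "skipped"
        · subst h3; simp [pvIsOther]
        · have e1 : (s == "success") = false := beq_eq_false_iff_ne.mpr h1
          have e2 : (s == "failed") = false := beq_eq_false_iff_ne.mpr h2
          have e3 : (s == "skipped") = false := beq_eq_false_iff_ne.mpr h3
          simp [pvIsOther, e1, e2, e3]
  rw [List.any_congr rfl hpt, pv_any_or, pv_any_or, ← Bool.or_assoc]

-- A's count test equals "all failed"
theorem pv_count_all (xs : List String) :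
    (PySem.List.count xs "failed" == (xs.length : Int)) =
      xs.all (fun s => s == "failed") := by
  rw [Bool.eq_iff_iff]
  simp only [PySem.List.count_eq, beq_iff_eq, Nat.cast_inj, List.all_eq_true]
  rw [List.count_eq_length]
  exact ⟨fun h b hb => (h b hb).symm, fun h b hb => (h b hb).symm⟩

-- ===== VERDICT =====
theorem determine_workflow_status_py_spec : Claim_equal_determine_workflow_status_py := by
  intro results _
  unfold Spec_determine_workflow_status_py determine_workflow_status_py determine_workflow_status_py_alt
  rw [pv_foldl_map]
  generalize (List.map (fun r => (PySem.Dict.mk r.2).getD "status" "unknown") results) = xs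
  simp only [pv_flags_spec, pv_count_all, Bool.false_or, pv_all_succ, pv_all_failed,
    pv_all_skipped]
  generalize xs.any (fun s => s == "success") = a
  generalize xs.any (fun s => s == "failed") = b
  generalize xs.any (fun s => s == "skipped") = c
  generalize xs.any pvIsOther = d
  cases a <;> cases b <;> cases c <;> cases d <;> rfl
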